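-- pv_equiv track=rewrite | github.com/RuomuZ/search_engine | indexer.py | get_aggre_batch
-- ===== SOURCE A (Python) =====
-- def get_aggre_batch(fl):
--     toReturn = []
--     batch = []
--     counter_1 = len(fl)
--     counter_2 = 0
--     while counter_1 > 0:
--         counter_1 -= 1
--         batch.append(fl[counter_1])
--         counter_2 += 1
--         if counter_2 == 10 or counter_1 == 0:
--             toReturn.append(batch)
--             batch = []
--             counter_2 = 0
--     return toReturn
-- ===== SOURCE B (Python) =====
-- def get_aggre_batch(fl):
--     rev = fl[::-1]
--     return [rev[i:i+10] for i in range(0, len(rev), 10)]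
-- ===== Notes on version B (the rewrite author's own statement) =====
-- stated objective: faster
-- what changed: Replaces A's element-by-element accumulator loop with two counters and a conditional flush by one reversed slice plus a stride-10 slice comprehension that emits each batch directly (~n/10 slice steps instead of n per-element appends).
import Mathlib
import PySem

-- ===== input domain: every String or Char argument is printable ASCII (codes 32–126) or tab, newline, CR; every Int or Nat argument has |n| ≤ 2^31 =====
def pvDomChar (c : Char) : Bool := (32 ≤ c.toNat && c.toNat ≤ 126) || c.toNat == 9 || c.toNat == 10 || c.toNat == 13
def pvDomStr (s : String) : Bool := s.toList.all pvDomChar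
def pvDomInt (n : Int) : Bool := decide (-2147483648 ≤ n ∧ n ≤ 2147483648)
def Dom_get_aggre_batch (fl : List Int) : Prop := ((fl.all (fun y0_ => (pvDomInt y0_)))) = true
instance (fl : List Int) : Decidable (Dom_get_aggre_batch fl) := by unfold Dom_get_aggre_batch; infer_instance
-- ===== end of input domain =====

-- B replaces A's element-by-element accumulator loop (two counters, conditional flush)
-- by one reversed slice and a stride-10 slice comprehension producing each batch directly; objective: faster (constant factor).


-- ===== PORT A =====
-- A's while loop: counter_1 counts down from len(fl); each iteration appends fl[counter_1]
-- to batch, increments counter_2, and flushes batch when counter_2 == 10 or counter_1 == 0.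
-- fl[counter_1] is ported with pyGet? (always in range here), defaulting to 0 for the none case.
def get_aggre_batch.loopA (fl : List Int) (toReturn : List (List Int)) (batch : List Int)
    (c1 : Nat) (c2 : Int) : List (List Int) :=
  match c1 with
  | 0 => toReturn
  | Nat.succ c1' =>
    let batch' := batch ++ [(PySem.List.pyGet? fl (c1' : Int)).getD 0]
    let c2' := c2 + 1
    if c2' = 10 ∨ c1' = 0 then
      get_aggre_batch.loopA fl (toReturn ++ [batch']) [] c1' 0
    else
      get_aggre_batch.loopA fl toReturn batch' c1' c2'

def get_aggre_batch (fl : List Int) : List (List Int) :=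
  get_aggre_batch.loopA fl [] [] fl.length 0

-- ===== PORT B =====
-- rev = fl[::-1]; [rev[i:i+10] for i in range(0, len(rev), 10)]
def get_aggre_batch_alt (fl : List Int) : List (List Int) :=
  match PySem.List.slice? fl none none (-1) with
  | some rev =>
      (PySem.List.pyRange 0 (rev.length : Int) 10).map
        (fun i => PySem.List.slice rev (some i) (some (i + 10)))
  | none => []   -- unreachable: step -1 ≠ 0

-- ===== PRECONDITION & SPEC =====
def Spec_get_aggre_batch (fl : List Int) (out : List (List Int)) : Prop := out = get_aggre_batch_alt fl
instance (fl : List Int) (out : List (List Int)) : Decidable (Spec_get_aggre_batch fl out) := by unfold Spec_get_aggre_batch; infer_instance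

-- ===== CLAIM (what is proved, stated in full; the proofs are below) =====
def Claim_equal_get_aggre_batch : Prop := ∀ (fl : List Int), Dom_get_aggre_batch fl → Spec_get_aggre_batch fl (get_aggre_batch fl)

-- ===== LEMMAS AND PROOFS =====

-- common middle form: chunks of ten by take/drop
def chunkTD (l : List Int) : List (List Int) :=
  if h : l = [] then [] else l.take 10 :: chunkTD (l.drop 10)
termination_by l.length
decreasing_by
  simp
  exact List.length_pos_of_ne_nil h

theorem chunkTD_eq (l : List Int) :
    chunkTD l = if l = [] then [] else l.take 10 :: chunkTD (l.drop 10) := by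
  conv_lhs => unfold chunkTD
  split_ifs <;> rfl

-- list-level reformulation of A's loop: process the remaining (reversed) elements one by one
def loop2 (r : List Int) (tR : List (List Int)) (batch : List Int) : List (List Int) :=
  match r with
  | [] => tR
  | x :: rs =>
    let b := batch ++ [x]
    if b.length = 10 ∨ rs = [] then loop2 rs (tR ++ [b]) []
    else loop2 rs tR b

-- A's counter loop equals loop2 on the reversed prefix of fl of length c1
theorem loopA_eq_loop2 (fl : List Int) (c1 : Nat) (h1 : c1 ≤ fl.length)
    (tR : List (List Int)) (batch : List Int) (h2 : (batch.length : Int) < 10) :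
    get_aggre_batch.loopA fl tR batch c1 (batch.length : Int) =
      loop2 ((fl.take c1).reverse) tR batch := by
  induction c1 generalizing tR batch with
  | zero => simp [get_aggre_batch.loopA, loop2]
  | succ c1' ih =>
    have hc1 : c1' < fl.length := by omega
    have hget : (PySem.List.pyGet? fl (c1' : Int)).getD 0 = fl[c1'] := by
      rw [PySem.List.pyGet?_natCast]
      simp [hc1]
    have htake : (fl.take (c1' + 1)).reverse = fl[c1'] :: (fl.take c1').reverse := by
      rw [List.take_add_one]
      simp [hc1]
    have hnil : ((fl.take c1').reverse = []) ↔ c1' = 0 := by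
      rw [List.reverse_eq_nil_iff, List.take_eq_nil_iff]
      constructor
      · rintro (h | rfl)
        · exact h
        · simp at hc1
      · intro h; exact Or.inl h
    rw [get_aggre_batch.loopA, htake]
    simp only [hget, loop2]
    by_cases hflush : (batch.length : Int) + 1 = 10 ∨ c1' = 0
    · have hflush' : (batch ++ [fl[c1']]).length = 10 ∨ (fl.take c1').reverse = [] := by
        rcases hflush with h | h
        · left; simp; omega
        · right; exact hnil.mpr h
      rw [if_pos hflush, if_pos hflush']
      simpa using ih (by omega) (tR ++ [batch ++ [fl[c1']]]) [] (by simp)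
    · push_neg at hflush
      have hflush' : ¬ ((batch ++ [fl[c1']]).length = 10 ∨ (fl.take c1').reverse = []) := by
        push_neg
        refine ⟨?_, ?_⟩
        · simp; omega
        · rw [Ne, hnil]; exact hflush.2
      rw [if_neg (by push_neg; exact hflush), if_neg hflush']
      simpa using ih (by omega) tR (batch ++ [fl[c1']]) (by simp; omega)

-- loop2 produces exactly the chunks of ten of (batch ++ r), appended to the accumulator
theorem loop2_eq_chunkTD (r : List Int) (tR : List (List Int)) (batch : List Int)
    (h : batch.length < 10) :
    loop2 r tR batch =
      if r = [] then tR else tR ++ chunkTD (batch ++ r) := by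
  induction r generalizing tR batch with
  | nil => simp [loop2]
  | cons x rs ih =>
    simp only [loop2]
    by_cases hflush : (batch ++ [x]).length = 10 ∨ rs = []
    · rw [if_pos hflush, if_neg (by simp)]
      have hBeq : chunkTD (batch ++ x :: rs) = (batch ++ [x]) :: chunkTD rs := by
        rw [chunkTD_eq, if_neg (by simp)]
        have hassoc : batch ++ x :: rs = (batch ++ [x]) ++ rs := by simp
        rcases hflush with hh | hh
        · rw [hassoc, ← hh, List.take_left, List.drop_left]
        · subst hh
          have hb10 : (batch ++ [x]).length ≤ 10 := by simp; omega
          rw [List.take_of_length_le hb10, List.drop_eq_nil_of_le hb10]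
      rw [hBeq, ih (tR ++ [batch ++ [x]]) [] (by simp)]
      by_cases hrs : rs = []
      · rw [if_pos hrs, hrs, chunkTD_eq]
        simp
      · rw [if_neg hrs]
        simp
    · push_neg at hflush
      rw [if_neg (by push_neg; exact hflush),
          ih tR (batch ++ [x]) (by have := hflush.1; simp at this ⊢; omega),
          if_neg hflush.2]
      simp

-- range(0, n, 10) over the natural numbers
theorem pyRange_ten (n : Nat) :
    PySem.List.pyRange 0 (n : Int) 10 =
      (List.range ((n + 9) / 10)).map (fun k => ((10 * k : Nat) : Int)) := by
  rw [PySem.List.pyRange_of_pos 0 (n : Int) (by decide : (0:Int) < 10)]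
  by_cases h : 0 < n
  · rw [if_pos (by exact_mod_cast h)]
    have hdiv : (((n : Int) - 0 + 10 - 1) / 10).toNat = (n + 9) / 10 := by omega
    rw [hdiv]
    apply List.map_congr_left
    intro k _
    push_cast
    ring
  · have hn : n = 0 := by omega
    subst hn
    rw [if_neg (by norm_num)]
    simp

-- the stride-10 chunk map is chunkTD
theorem chunk_map (l : List Int) :
    (List.range ((l.length + 9) / 10)).map (fun k => (l.drop (10 * k)).take 10) = chunkTD l := by
  by_cases h : l = []
  · subst h
    rw [chunkTD_eq]
    simp
  · have hn : 0 < l.length := List.length_pos_of_ne_nil h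
    have hm : (l.length + 9) / 10 = (l.length - 10 + 9) / 10 + 1 := by omega
    rw [hm, List.range_succ_eq_map, List.map_cons, chunkTD_eq, if_neg h]
    congr 1
    have IH := chunk_map (l.drop 10)
    rw [List.length_drop] at IH
    rw [List.map_map, ← IH]
    apply List.map_congr_left
    intro k _
    show List.take 10 (List.drop (10 * (k + 1)) l) = List.take 10 (List.drop (10 * k) (List.drop 10 l))
    rw [List.drop_drop]
    congr 2
    omega
termination_by l.length
decreasing_by
  simp
  omega

-- B computes chunkTD of the reversed list
theorem alt_eq_chunkTD (fl : List Int) :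
    get_aggre_batch_alt fl = chunkTD fl.reverse := by
  unfold get_aggre_batch_alt
  rw [PySem.List.slice?_none_none_neg_one]
  show (PySem.List.pyRange 0 (fl.reverse.length : Int) 10).map _ = _
  rw [pyRange_ten, List.map_map, ← chunk_map fl.reverse]
  apply List.map_congr_left
  intro k _
  show PySem.List.slice fl.reverse (some ((10 * k : Nat) : Int)) (some (((10 * k : Nat) : Int) + 10)) = _
  have h10 : ((10 * k : Nat) : Int) + 10 = ((10 * k + 10 : Nat) : Int) := by push_cast; ring
  rw [h10, PySem.List.slice_natCast]
  congr 1
  omega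

-- ===== VERDICT (by name: the statement is the Claim_ definition above) =====
theorem get_aggre_batch_spec : Claim_equal_get_aggre_batch := by
  intro fl _
  unfold Spec_get_aggre_batch get_aggre_batch
  rw [alt_eq_chunkTD]
  have hA := loopA_eq_loop2 fl fl.length (le_refl _) [] [] (by simp)
  simp only [List.length_nil, Nat.cast_zero] at hA
  rw [hA, List.take_length,
      loop2_eq_chunkTD fl.reverse [] [] (by simp)]
  by_cases h : fl.reverse = []
  · rw [if_pos h, h, chunkTD_eq]
    simp
  · rw [if_neg h]
    simp
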